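-- pv_equiv track=rewrite | github.com/datapointchris/zmk-config | align_keymap.py | build_layer_structure
-- ===== SOURCE A (Python) =====
-- def build_layer_structure(layers, layout):
--     """
--     Organize layer bindings according to the keyboard layout matrix.
--     """
--     layout_matrix = layout["layout"]
--     structured_layers = {}
--
--     for layer_name, bindings in layers.items():
--         layer_rows = []
--         binding_index = 0
--
--         for row in layout_matrix:
--             row_bindings = []
--             for cell in row:
--                 if cell == "X":
--                     if binding_index < len(bindings):
--                         row_bindings.append(bindings[binding_index])
--                         binding_index += 1
--                     else:
--                         row_bindings.append(None)  # Missing binding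
--                 else:
--                     row_bindings.append(None)  # Empty position
--             layer_rows.append(row_bindings)
--
--         structured_layers[layer_name] = layer_rows
--
--     return structured_layers
-- ===== SOURCE B (Python) =====
-- def build_layer_structure(layers, layout):
--     """
--     Organize layer bindings according to the keyboard layout matrix.
--
--     Two-phase approach: first compute the coordinates of all 'X' cells once,
--     then for each layer scatter its bindings onto an all-None grid.
--     """
--     layout_matrix = layout["layout"]
--     coords = [
--         (r, c)
--         for r, row in enumerate(layout_matrix)
--         for c, cell in enumerate(row)
--         if cell == "X"
--     ]
--
--     structured_layers = {}
--     for layer_name, bindings in layers.items():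
--         grid = [[None] * len(row) for row in layout_matrix]
--         for (r, c), binding in zip(coords, bindings):
--             grid[r][c] = binding
--         structured_layers[layer_name] = grid
--
--     return structured_layers
-- ===== Notes on version B (the rewrite author's own statement) =====
-- stated objective: alternative
-- what changed: A walks every cell of the matrix per layer carrying a binding counter with per-cell branching; B precomputes the 'X' cell coordinates once and, per layer, scatters the bindings onto an all-None grid by zipping coordinates with bindings.
-- outside the precondition, e.g. on build_layer_structure({'base': ['&kp A']}, {'matrix': [['X']]}): A raises KeyError, B raises KeyError
import Mathlib
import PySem

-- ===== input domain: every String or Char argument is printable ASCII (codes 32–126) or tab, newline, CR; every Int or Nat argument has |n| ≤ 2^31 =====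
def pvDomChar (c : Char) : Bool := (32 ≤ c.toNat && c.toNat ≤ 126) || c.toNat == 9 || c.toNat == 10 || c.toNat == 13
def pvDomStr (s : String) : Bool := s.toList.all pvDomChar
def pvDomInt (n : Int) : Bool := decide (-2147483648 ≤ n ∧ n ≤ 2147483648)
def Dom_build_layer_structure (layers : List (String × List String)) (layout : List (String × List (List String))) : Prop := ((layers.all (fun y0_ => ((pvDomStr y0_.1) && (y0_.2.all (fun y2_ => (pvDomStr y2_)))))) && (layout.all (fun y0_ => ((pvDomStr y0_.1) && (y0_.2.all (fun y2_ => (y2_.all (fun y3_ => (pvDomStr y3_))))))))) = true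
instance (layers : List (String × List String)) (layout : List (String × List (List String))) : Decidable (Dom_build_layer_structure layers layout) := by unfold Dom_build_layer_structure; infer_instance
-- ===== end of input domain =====

-- B replaces A's per-cell binding-counter walk by a two-phase pass: compute the 'X' cell
-- coordinates once, then scatter each layer's bindings onto an all-None grid (objective: alternative).

-- ===== PORT A =====
-- per-layer body of A: walk the matrix cell by cell, carrying the binding counter
def pvAFill (bs : List String) (matrix : List (List String)) : List (List (Option String)) :=
  (matrix.foldl (fun (st : List (List (Option String)) × Nat) row =>
      let rt := row.foldl (fun (rt : List (Option String) × Nat) cell =>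
          if cell = "X" then
            if rt.2 < bs.length then (rt.1 ++ [bs[rt.2]?], rt.2 + 1)
            else (rt.1 ++ [(none : Option String)], rt.2)
          else (rt.1 ++ [(none : Option String)], rt.2)) (([] : List (Option String)), st.2)
      (st.1 ++ [rt.1], rt.2)) (([] : List (List (Option String))), 0)).1

def build_layer_structure (layers : List (String × List String)) (layout : List (String × List (List String))) : List (String × List (List (Option String))) :=
  let layout_matrix := ((PySem.Dict.mk layout).get? "layout").getD []
  (layers.foldl (fun d p => d.insert p.1 (pvAFill p.2 layout_matrix)) PySem.Dict.empty).items

-- ===== PORT B =====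
-- the coordinate comprehension of Source B, as structural recursion carrying the (row, col)
-- indices (hand port of the nested 'enumerate' comprehension; indices are nonnegative Nats)
def pvColsFrom (r : Nat) : Nat → List String → List (Nat × Nat)
  | _, [] => []
  | c, cell :: cs => (if cell = "X" then [(r, c)] else []) ++ pvColsFrom r (c + 1) cs

def pvCoords : Nat → List (List String) → List (Nat × Nat)
  | _, [] => []
  | r, row :: rs => pvColsFrom r 0 row ++ pvCoords (r + 1) rs

def build_layer_structure_alt (layers : List (String × List String)) (layout : List (String × List (List String))) : List (String × List (List (Option String))) :=
  let layout_matrix := ((PySem.Dict.mk layout).get? "layout").getD []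
  let coords := pvCoords 0 layout_matrix
  (layers.foldl (fun d p =>
      let grid0 := layout_matrix.map (fun row => List.replicate row.length (none : Option String))
      let grid := (coords.zip p.2).foldl
        (fun g q => g.modify q.1.1 (fun row => row.set q.1.2 (some q.2))) grid0
      d.insert p.1 grid) PySem.Dict.empty).items

-- ===== PRECONDITION & SPEC =====
-- Pre_ excludes exactly the inputs where layout has no "layout" key: there Python A raises KeyError.
def Pre_build_layer_structure (layers : List (String × List String)) (layout : List (String × List (List String))) : Prop :=
  "layout" ∈ layout.map Prod.fst
instance (layers : List (String × List String)) (layout : List (String × List (List String))) : Decidable (Pre_build_layer_structure layers layout) := by unfold Pre_build_layer_structure; infer_instance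

def pvWitness_build_layer_structure : (List (String × List String)) × (List (String × List (List String))) :=
  ([("default", ["&kp A", "&kp B", "&kp C"])], [("layout", [["X", "", "X"], ["-", "X"]])])

def Spec_build_layer_structure (layers : List (String × List String)) (layout : List (String × List (List String))) (out : List (String × List (List (Option String)))) : Prop := out = build_layer_structure_alt layers layout
instance (layers : List (String × List String)) (layout : List (String × List (List String))) (out : List (String × List (List (Option String)))) : Decidable (Spec_build_layer_structure layers layout out) := by unfold Spec_build_layer_structure; infer_instance

-- ===== CLAIM (what is proved, stated in full; the proofs are below) =====
def Claim_equal_build_layer_structure : Prop := ∀ (layers : List (String × List String)) (layout : List (String × List (List String))), Dom_build_layer_structure layers layout → Pre_build_layer_structure layers layout → Spec_build_layer_structure layers layout (build_layer_structure layers layout)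

-- ===== LEMMAS AND PROOFS =====

-- reference fill: consume bindings left-to-right across a row / the matrix
def pvSRow : List String → List String → List (Option String)
  | [], _ => []
  | c :: cs, l => if c = "X" then l.head? :: pvSRow cs l.tail else none :: pvSRow cs l

def pvSRows : List (List String) → List String → List (List (Option String))
  | [], _ => []
  | row :: rs, bs => pvSRow row bs :: pvSRows rs (bs.drop (pvColsFrom 0 0 row).length)

theorem pvColsFrom_shift_c (row : List String) : ∀ (r c : Nat),
    pvColsFrom r (c + 1) row = (pvColsFrom r c row).map (fun q => (q.1, q.2 + 1)) := by
  induction row with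
  | nil => intro r c; simp [pvColsFrom]
  | cons x xs ih => intro r c; simp [pvColsFrom, ih, apply_ite (List.map (fun q : Nat × Nat => (q.1, q.2 + 1)))]

theorem pvColsFrom_shift_r (row : List String) : ∀ (r c : Nat),
    pvColsFrom (r + 1) c row = (pvColsFrom r c row).map (fun q => (q.1 + 1, q.2)) := by
  induction row with
  | nil => intro r c; simp [pvColsFrom]
  | cons x xs ih => intro r c; simp [pvColsFrom, ih, apply_ite (List.map (fun q : Nat × Nat => (q.1 + 1, q.2)))]

theorem pvCoords_shift (m : List (List String)) : ∀ (r : Nat),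
    pvCoords (r + 1) m = (pvCoords r m).map (fun q => (q.1 + 1, q.2)) := by
  induction m with
  | nil => intro r; simp [pvCoords]
  | cons row rs ih => intro r; simp [pvCoords, ih, pvColsFrom_shift_r]

theorem pvColsFrom_fst (row : List String) : ∀ (r c : Nat), ∀ q ∈ pvColsFrom r c row, q.1 = r := by
  induction row with
  | nil => intro r c q hq; simp [pvColsFrom] at hq
  | cons x xs ih =>
    intro r c q hq
    simp only [pvColsFrom, List.mem_append] at hq
    rcases hq with hq | hq
    · split at hq <;> simp_all
    · exact ih r (c + 1) q hq

theorem pvSRow_nil (row : List String) : pvSRow row [] = List.replicate row.length none := by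
  induction row with
  | nil => simp [pvSRow]
  | cons c cs ih => by_cases h : c = "X" <;> simp [pvSRow, h, ih, List.replicate_succ]

-- zip of an append splits the right list
theorem pvZip_append {α β : Type} (l1 : List α) : ∀ (l2 : List α) (bs : List β),
    (l1 ++ l2).zip bs = l1.zip bs ++ l2.zip (bs.drop l1.length) := by
  induction l1 with
  | nil => intro l2 bs; simp
  | cons x xs ih =>
    intro l2 bs
    cases bs with
    | nil => simp
    | cons b bs' => simp [ih]

-- setting at shifted-by-one columns leaves the head cell alone
theorem pvSet_shift (ps : List ((Nat × Nat) × String)) : ∀ (x : Option String) (r : List (Option String)),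
    (ps.map (Prod.map (fun q : Nat × Nat => (q.1, q.2 + 1)) id)).foldl
        (fun rg q => rg.set q.1.2 (some q.2)) (x :: r)
      = x :: ps.foldl (fun rg q => rg.set q.1.2 (some q.2)) r := by
  induction ps with
  | nil => intro x r; simp
  | cons p ps ih => intro x r; simp [ih, Prod.map]

-- modifying at shifted-by-one rows leaves the head row alone
theorem pvModify_shift (ps : List ((Nat × Nat) × String)) : ∀ (x : List (Option String)) (g : List (List (Option String))),
    (ps.map (Prod.map (fun q : Nat × Nat => (q.1 + 1, q.2)) id)).foldl
        (fun g q => g.modify q.1.1 (fun row => row.set q.1.2 (some q.2))) (x :: g)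
      = x :: ps.foldl (fun g q => g.modify q.1.1 (fun row => row.set q.1.2 (some q.2))) g := by
  induction ps with
  | nil => intro x g; simp
  | cons p ps ih => intro x g; simp [ih, Prod.map]

-- pairs whose row index is 0 only touch the head row
theorem pvScatter_head (ps : List ((Nat × Nat) × String)) : ∀ (x : List (Option String)) (g : List (List (Option String))),
    (∀ q ∈ ps, q.1.1 = 0) →
    ps.foldl (fun g q => g.modify q.1.1 (fun row => row.set q.1.2 (some q.2))) (x :: g)
      = (ps.foldl (fun rg q => rg.set q.1.2 (some q.2)) x) :: g := by
  induction ps with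
  | nil => intro x g _; simp
  | cons p ps ih =>
    intro p0 g h
    have hp : p.1.1 = 0 := h p (by simp)
    simp only [List.foldl_cons, hp, List.modify]
    exact ih _ g (fun q hq => h q (by simp [hq]))

-- scattering one row's bindings onto an all-None row = the reference row fill
theorem pvRowFill (row : List String) : ∀ (bs : List String),
    ((pvColsFrom 0 0 row).zip bs).foldl (fun rg q => rg.set q.1.2 (some q.2))
        (List.replicate row.length none)
      = pvSRow row bs := by
  induction row with
  | nil => intro bs; simp [pvColsFrom, pvSRow]
  | cons cell cs ih =>
    intro bs
    by_cases hX : cell = "X"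
    · subst hX
      cases bs with
      | nil =>
        simp [pvColsFrom, pvSRow, pvSRow_nil, List.replicate_succ]
      | cons b bs' =>
        rw [show pvColsFrom 0 0 ("X" :: cs)
            = (0, 0) :: (pvColsFrom 0 0 cs).map (fun q : Nat × Nat => (q.1, q.2 + 1)) from by
          simp [pvColsFrom, pvColsFrom_shift_c]]
        simp only [List.replicate_succ, List.length_cons, List.zip_cons_cons,
          List.foldl_cons, List.set_cons_zero, List.zip_map_left]
        rw [pvSet_shift, ih]
        simp [pvSRow]
    · rw [show pvColsFrom 0 0 (cell :: cs)
          = (pvColsFrom 0 0 cs).map (fun q : Nat × Nat => (q.1, q.2 + 1)) from by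
        simp [pvColsFrom, hX, pvColsFrom_shift_c]]
      simp only [List.replicate_succ, List.length_cons, List.zip_map_left]
      rw [pvSet_shift, ih]
      simp [pvSRow, hX]

-- B's scatter over the coordinate list = the reference fill
theorem pvBFill_eq (matrix : List (List String)) : ∀ (bs : List String),
    ((pvCoords 0 matrix).zip bs).foldl
        (fun g q => g.modify q.1.1 (fun row => row.set q.1.2 (some q.2)))
        (matrix.map (fun row => List.replicate row.length (none : Option String)))
      = pvSRows matrix bs := by
  induction matrix with
  | nil => intro bs; simp [pvCoords, pvSRows]
  | cons row rs ih =>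
    intro bs
    simp only [pvCoords, List.map_cons, pvSRows]
    rw [pvZip_append, List.foldl_append]
    rw [pvScatter_head _ _ _ (fun q hq => by
      rcases List.of_mem_zip hq with ⟨hmem, _⟩
      exact pvColsFrom_fst row 0 0 _ hmem)]
    rw [pvRowFill]
    rw [pvCoords_shift, List.zip_map_left]
    rw [pvModify_shift, ih]

-- A's inner (per-row) fold, with counter invariant bi = min k |bs|
theorem pvARow (bs : List String) (row : List String) : ∀ (acc : List (Option String)) (k : Nat),
    row.foldl (fun (rt : List (Option String) × Nat) cell =>
        if cell = "X" then
          if rt.2 < bs.length then (rt.1 ++ [bs[rt.2]?], rt.2 + 1)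
          else (rt.1 ++ [(none : Option String)], rt.2)
        else (rt.1 ++ [(none : Option String)], rt.2)) (acc, min k bs.length)
      = (acc ++ pvSRow row (bs.drop k), min (k + (pvColsFrom 0 0 row).length) bs.length) := by
  induction row with
  | nil => intro acc k; simp [pvSRow, pvColsFrom]
  | cons cell cs ih =>
    intro acc k
    by_cases hX : cell = "X"
    · subst hX
      have hv : (if ("X" : String) = "X" then
          (if min k bs.length < bs.length then (acc ++ [bs[min k bs.length]?], min k bs.length + 1)
           else (acc ++ [(none : Option String)], min k bs.length))
          else (acc ++ [(none : Option String)], min k bs.length))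
          = (acc ++ [bs[k]?], min (k + 1) bs.length) := by
        rw [if_pos rfl]
        by_cases hk : k < bs.length
        · rw [if_pos (by omega), Nat.min_eq_left (by omega), Nat.min_eq_left (by omega)]
        · rw [if_neg (by omega), Nat.min_eq_right (by omega), Nat.min_eq_right (by omega)]
          have hnone : bs[k]? = none := by rw [List.getElem?_eq_none_iff]; omega
          simp [hnone]
      rw [List.foldl_cons, hv, ih (acc ++ [bs[k]?]) (k + 1)]
      have hc : (pvColsFrom 0 0 ("X" :: cs)).length = (pvColsFrom 0 0 cs).length + 1 := by
        simp [pvColsFrom, pvColsFrom_shift_c]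
      simp only [pvSRow, List.head?_drop, List.tail_drop, hc, Prod.mk.injEq]
      refine ⟨by simp, by omega⟩
    · rw [List.foldl_cons, if_neg hX, ih (acc ++ [(none : Option String)]) k]
      have hc : (pvColsFrom 0 0 (cell :: cs)).length = (pvColsFrom 0 0 cs).length := by
        simp [pvColsFrom, hX, pvColsFrom_shift_c]
      simp [pvSRow, hX, hc]

-- A's outer (per-matrix) fold = the reference fill
theorem pvARows (bs : List String) (matrix : List (List String)) :
    ∀ (acc : List (List (Option String))) (k : Nat),
    (matrix.foldl (fun (st : List (List (Option String)) × Nat) row =>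
        (st.1 ++ [(row.foldl (fun (rt : List (Option String) × Nat) cell =>
            if cell = "X" then
              if rt.2 < bs.length then (rt.1 ++ [bs[rt.2]?], rt.2 + 1)
              else (rt.1 ++ [(none : Option String)], rt.2)
            else (rt.1 ++ [(none : Option String)], rt.2)) (([] : List (Option String)), st.2)).1],
         (row.foldl (fun (rt : List (Option String) × Nat) cell =>
            if cell = "X" then
              if rt.2 < bs.length then (rt.1 ++ [bs[rt.2]?], rt.2 + 1)
              else (rt.1 ++ [(none : Option String)], rt.2)
            else (rt.1 ++ [(none : Option String)], rt.2)) (([] : List (Option String)), st.2)).2))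
        (acc, min k bs.length)).1
      = acc ++ pvSRows matrix (bs.drop k) := by
  induction matrix with
  | nil => intro acc k; simp [pvSRows]
  | cons row rs ih =>
    intro acc k
    rw [List.foldl_cons]
    rw [show ((acc, min k bs.length) : List (List (Option String)) × Nat).1 = acc from rfl] -- keep shape
    rw [show ((acc, min k bs.length) : List (List (Option String)) × Nat).2 = min k bs.length from rfl]
    rw [pvARow bs row [] k]
    rw [ih (acc ++ [([] : List (Option String)) ++ pvSRow row (bs.drop k)]) (k + (pvColsFrom 0 0 row).length)]
    simp [pvSRows, List.drop_drop]

theorem pvFill_agree (bs : List String) (matrix : List (List String)) :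
    pvAFill bs matrix
      = ((pvCoords 0 matrix).zip bs).foldl
          (fun g q => g.modify q.1.1 (fun row => row.set q.1.2 (some q.2)))
          (matrix.map (fun row => List.replicate row.length (none : Option String))) := by
  rw [pvBFill_eq]
  have h := pvARows bs matrix [] 0
  simp only [Nat.zero_min, List.drop_zero, List.nil_append] at h
  simpa [pvAFill] using h

theorem pvFold_agree (matrix : List (List String)) (layers : List (String × List String)) :
    ∀ (d : PySem.Dict String (List (List (Option String)))),
    layers.foldl (fun d p => d.insert p.1 (pvAFill p.2 matrix)) d
      = layers.foldl (fun d p =>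
          d.insert p.1 (((pvCoords 0 matrix).zip p.2).foldl
            (fun g q => g.modify q.1.1 (fun row => row.set q.1.2 (some q.2)))
            (matrix.map (fun row => List.replicate row.length (none : Option String))))) d := by
  induction layers with
  | nil => intro d; rfl
  | cons p ps ih => intro d; rw [List.foldl_cons, List.foldl_cons, pvFill_agree, ih]

-- ===== VERDICT (by name: the statement is the Claim_ definition above) =====
theorem build_layer_structure_spec : Claim_equal_build_layer_structure := by
  intro layers layout _ _
  exact congrArg PySem.Dict.items
    (pvFold_agree (((PySem.Dict.mk layout).get? "layout").getD []) layers PySem.Dict.empty)
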